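-- pv_equiv track=rewrite | github.com/NicolasADavid/PythonChallenges | Facebook/seating-arrangements.py | minOverallAwkwardness
-- ===== SOURCE A (Python) =====
-- def minOverallAwkwardness(arr):
--   # sort the input
--   arr = sorted(arr)
--
--   # Init output array
--   output = [None] * len(arr)
--
--   # Place largest at leftmost
--   # Place next largest to right of leftmost
--   # Place next largest at rightmost
--   # Alternate between placing to the right of the elements on the left
--   #     and the left of the elements on the right
--
--   l = 1
--   r = len(arr) - 1
--   placeLeft = True
--
--   output[0] = arr.pop()
--
--   while arr:
--
--     if placeLeft:
--       output[l] = arr.pop()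
--       l += 1
--     else:
--       output[r] = arr.pop()
--       r -= 1
--
--     placeLeft = not placeLeft
--
--   endDiff = abs(output[0]-output[-1])
--
--   worst = endDiff
--
--   for i in range(1, len(output)):
--     worst = max(worst, abs(output[i]-output[i-1]))
--
--   return worst
-- ===== SOURCE B (Python) =====
-- def minOverallAwkwardness(arr):
--   s = sorted(arr)
--   n = len(s)
--   if n < 3:
--     return abs(s[0] - s[-1])
--   worst = s[2] - s[0]
--   for i in range(1, n - 2):
--     worst = max(worst, s[i + 2] - s[i])
--   return worst
-- ===== Notes on version B (the rewrite author's own statement) =====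
-- stated objective: alternative
-- what changed: Instead of materialising the zigzag circular seating and scanning its adjacent differences, B uses the closed form that the worst adjacency of that arrangement equals the maximum gap between elements two apart in the sorted list (absolute difference of the two ends when fewer than three elements), so no output array is built.
import Mathlib
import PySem

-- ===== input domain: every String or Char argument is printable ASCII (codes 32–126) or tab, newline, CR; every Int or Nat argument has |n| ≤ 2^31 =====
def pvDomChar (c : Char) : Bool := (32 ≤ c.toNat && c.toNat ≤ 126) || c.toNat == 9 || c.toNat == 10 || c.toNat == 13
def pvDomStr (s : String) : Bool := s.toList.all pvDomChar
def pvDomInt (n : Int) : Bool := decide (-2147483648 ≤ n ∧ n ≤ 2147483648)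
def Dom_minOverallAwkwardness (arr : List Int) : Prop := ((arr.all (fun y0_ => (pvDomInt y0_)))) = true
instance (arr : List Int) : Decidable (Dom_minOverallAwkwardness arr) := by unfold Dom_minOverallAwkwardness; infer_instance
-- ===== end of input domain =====

-- B replaces A's zigzag seating construction by the closed form "worst adjacency =
-- max gap between elements two apart in the sorted list" (absolute difference of the
-- two ends when fewer than three elements): an alternative algorithm that builds no
-- output array.


-- ===== PORT A =====
-- A's while loop. Python pops arr (ascending) from the END; we pass the remaining
-- elements already reversed (descending), so each arr.pop() is exactly the head here:
-- the same elements are handled in the same order and written at the same indices.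
def pvPlaceLoop : List Int → List Int → Nat → Nat → Bool → List Int
  | [], output, _, _, _ => output
  | v :: rest, output, l, r, placeLeft =>
      if placeLeft then pvPlaceLoop rest (output.set l v) (l + 1) r false
      else pvPlaceLoop rest (output.set r v) l (r - 1) true

def minOverallAwkwardness (arr : List Int) : Int :=
  let s := PySem.List.sorted arr (fun x => x) false
  if hs : s = [] then 0  -- output[0] = arr.pop() raises IndexError on []; excluded by Pre_
  else
    -- output = [None]*len(arr) (the None placeholders are never read; modeled as 0);
    -- output[0] = arr.pop()
    let output0 := (List.replicate s.length (0 : Int)).set 0 (s.getLast hs)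
    let output := pvPlaceLoop s.dropLast.reverse output0 1 (s.length - 1) true
    let endDiff := |PySem.List.pyGetD output 0 0 - PySem.List.pyGetD output (-1) 0|
    (PySem.List.pyRange 1 (PySem.List.len output) 1).foldl
      (fun worst i => max worst |PySem.List.pyGetD output i 0 - PySem.List.pyGetD output (i - 1) 0|)
      endDiff

-- ===== PORT B =====
def minOverallAwkwardness_alt (arr : List Int) : Int :=
  let s := PySem.List.sorted arr (fun x => x) false
  let n := s.length
  if n < 3 then |PySem.List.pyGetD s 0 0 - PySem.List.pyGetD s (-1) 0|  -- indexing raises IndexError on the empty list; excluded by Pre_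
  else
    (PySem.List.pyRange 1 ((n : Int) - 2) 1).foldl
      (fun worst i => max worst (PySem.List.pyGetD s (i + 2) 0 - PySem.List.pyGetD s i 0))
      (PySem.List.pyGetD s 2 0 - PySem.List.pyGetD s 0 0)

-- ===== PRECONDITION & SPEC =====
-- Pre_ excludes only the empty list, on which Python A raises IndexError (pop from empty list).
def Pre_minOverallAwkwardness (arr : List Int) : Prop := arr ≠ []
instance (arr : List Int) : Decidable (Pre_minOverallAwkwardness arr) := by
  unfold Pre_minOverallAwkwardness; infer_instance

def pvWitness_minOverallAwkwardness : List Int := [3, 1, 10, 2]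

def Spec_minOverallAwkwardness (arr : List Int) (out : Int) : Prop := out = minOverallAwkwardness_alt arr
instance (arr : List Int) (out : Int) : Decidable (Spec_minOverallAwkwardness arr out) := by unfold Spec_minOverallAwkwardness; infer_instance

-- ===== CLAIM (what is proved, stated in full; the proofs are below) =====
def Claim_equal_minOverallAwkwardness : Prop := ∀ (arr : List Int), Dom_minOverallAwkwardness arr → Pre_minOverallAwkwardness arr → Spec_minOverallAwkwardness arr (minOverallAwkwardness arr)

-- ===== LEMMAS AND PROOFS =====

def pvMid : List Int → Bool → List Int
  | [], _ => []
  | x :: t, true => x :: pvMid t false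
  | x :: t, false => pvMid t true ++ [x]

theorem pvMid_length (t : List Int) : ∀ b : Bool, (pvMid t b).length = t.length := by
  induction t with
  | nil => intro b; cases b <;> rfl
  | cons x t ih => intro b; cases b <;> simp [pvMid, ih]

theorem pvMid_getD (t : List Int) : ∀ j, j < t.length →
    ((pvMid t true).getD j 0 =
      if 2 * j < t.length then t.getD (2 * j) 0 else t.getD (2 * (t.length - 1 - j) + 1) 0)
    ∧ ((pvMid t false).getD j 0 =
      if 2 * j + 1 < t.length then t.getD (2 * j + 1) 0 else t.getD (2 * (t.length - 1 - j)) 0) := by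
  induction t with
  | nil => intro j hj; simp at hj
  | cons x t ih =>
    intro j hj
    constructor
    · -- true flag
      match j with
      | 0 =>
        simp [pvMid]
      | j + 1 =>
        have hjt : j < t.length := by simpa using hj
        have h2 := (ih j hjt).2
        show (pvMid t false).getD j 0 = _
        rw [h2]
        by_cases hc : 2 * j + 1 < t.length
        · rw [if_pos hc, if_pos (by simp; omega)]
          have : 2 * (j + 1) = (2 * j + 1) + 1 := by omega
          rw [this, List.getD_cons_succ]
        · rw [if_neg hc, if_neg (by simp; omega)]
          have h1 : 2 * ((x :: t).length - 1 - (j + 1)) + 1 = (2 * (t.length - 1 - j)) + 1 := by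
            simp; omega
          rw [h1, List.getD_cons_succ]
    · -- false flag
      show (pvMid t true ++ [x]).getD j 0 = _
      by_cases hjt : j < t.length
      · rw [List.getD_append _ _ _ _ (by rw [pvMid_length]; exact hjt)]
        have h1 := (ih j hjt).1
        rw [h1]
        by_cases hc : 2 * j < t.length
        · rw [if_pos hc, if_pos (by simp; omega)]
          have : 2 * j + 1 = (2 * j) + 1 := rfl
          rw [this, List.getD_cons_succ]
        · rw [if_neg hc, if_neg (by simp; omega)]
          have h1 : 2 * ((x :: t).length - 1 - j) = (2 * (t.length - 1 - j) + 1) + 1 := by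
            simp; omega
          rw [h1, List.getD_cons_succ]
      · have hj' : j = t.length := by simp at hj; omega
        subst hj'
        rw [List.getD_append_right _ _ _ _ (by rw [pvMid_length])]
        rw [pvMid_length]
        simp only [Nat.sub_self]
        rw [if_neg (by simp only [List.length_cons]; omega)]
        have : 2 * ((x :: t).length - 1 - t.length) = 0 := by simp
        rw [this]
        simp
theorem getD_dropLast_reverse (s : List Int) (i : Nat) (hi : i < s.length - 1) :
    s.dropLast.reverse.getD i 0 = s.getD (s.length - 2 - i) 0 := by
  have h1 : i < s.dropLast.reverse.length := by simp; omega
  rw [List.getD_eq_getElem _ _ h1, List.getElem_reverse,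
      List.getElem_dropLast, List.getD_eq_getElem _ _ (by simp at h1 ⊢; omega)]
  congr 1
  simp
  omega

theorem oget_eq (s : List Int) (hs : s ≠ []) (j : Nat) (hj : j < s.length) :
    (s.getLast hs :: pvMid s.dropLast.reverse true).getD j 0 =
      if j = 0 then s.getD (s.length - 1) 0
      else if 2 * j ≤ s.length then s.getD (s.length - 2 * j) 0
      else s.getD (2 * j - s.length - 1) 0 := by
  have hn1 : 1 ≤ s.length := List.length_pos_iff.mpr hs
  have hdtlen : s.dropLast.reverse.length = s.length - 1 := by simp
  match j with
  | 0 =>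
    rw [if_pos rfl, List.getD_cons_zero, List.getLast_eq_getElem,
        List.getD_eq_getElem _ _ (by omega)]
  | j + 1 =>
    rw [if_neg (by omega), List.getD_cons_succ]
    have hjt : j < s.dropLast.reverse.length := by omega
    have h1 := (pvMid_getD s.dropLast.reverse j hjt).1
    rw [h1, hdtlen]
    rw [hdtlen] at hjt
    by_cases hc : 2 * j < s.length - 1
    · rw [if_pos hc, if_pos (by omega : 2 * (j + 1) ≤ s.length)]
      rw [getD_dropLast_reverse _ _ (by omega)]
      have : s.length - 2 - 2 * j = s.length - 2 * (j + 1) := by omega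
      rw [this]
    · rw [if_neg hc, if_neg (by omega : ¬ 2 * (j + 1) ≤ s.length)]
      rw [getD_dropLast_reverse _ _ (by omega)]
      have : s.length - 2 - (2 * (s.length - 1 - 1 - j) + 1) = 2 * (j + 1) - s.length - 1 := by omega
      rw [this]

theorem pvCore (s : List Int) (hs : s ≠ []) (h3 : 3 ≤ s.length)
    (hmono : ∀ p q : Nat, p ≤ q → q < s.length → s.getD p 0 ≤ s.getD q 0) :
    ((List.range (s.length - 1)).map (fun k =>
        |(s.getLast hs :: pvMid s.dropLast.reverse true).getD (k + 1) 0
          - (s.getLast hs :: pvMid s.dropLast.reverse true).getD k 0|)).foldl max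
      |(s.getLast hs :: pvMid s.dropLast.reverse true).getD 0 0
          - (s.getLast hs :: pvMid s.dropLast.reverse true).getD (s.length - 1) 0|
    = ((List.range (s.length - 3)).map (fun k =>
        s.getD (k + 1 + 2) 0 - s.getD (k + 1) 0)).foldl max (s.getD 2 0 - s.getD 0 0) := by
  set n := s.length with hn
  set o := s.getLast hs :: pvMid s.dropLast.reverse true with ho
  -- index description of the arrangement
  have hog0 : o.getD 0 0 = s.getD (n - 1) 0 := by
    rw [ho, oget_eq s hs 0 (by omega), if_pos rfl]
  have hogL : ∀ j, 1 ≤ j → 2 * j ≤ n → j < n → o.getD j 0 = s.getD (n - 2 * j) 0 := by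
    intro j h1 h2 hj
    rw [ho, oget_eq s hs j hj, if_neg (by omega), if_pos h2]
  have hogR : ∀ j, n < 2 * j → j < n → o.getD j 0 = s.getD (2 * j - n - 1) 0 := by
    intro j h1 hj
    rw [ho, oget_eq s hs j hj, if_neg (by omega), if_neg (by omega)]
  have habs : ∀ a b : Nat, b ≤ a → a < n → |s.getD a 0 - s.getD b 0| = s.getD a 0 - s.getD b 0 :=
    fun a b hba ha => abs_of_nonneg (sub_nonneg.mpr (hmono b a hba ha))
  have habs' : ∀ a b : Nat, b ≤ a → a < n → |s.getD b 0 - s.getD a 0| = s.getD a 0 - s.getD b 0 :=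
    fun a b hba ha => by rw [abs_sub_comm]; exact habs a b hba ha
  set Lst := (List.range (n - 1)).map (fun k => |o.getD (k + 1) 0 - o.getD k 0|) with hLst
  set Rst := (List.range (n - 3)).map (fun k => s.getD (k + 1 + 2) 0 - s.getD (k + 1) 0) with hRst
  set e := |o.getD 0 0 - o.getD (n - 1) 0| with he
  set g0 := s.getD 2 0 - s.getD 0 0 with hg0
  -- every two-apart gap is bounded by B's fold
  have hgapR : ∀ i, i ≤ n - 3 → s.getD (i + 2) 0 - s.getD i 0 ≤ Rst.foldl max g0 := by
    intro i hi
    match i with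
    | 0 => exact (PySem.List.le_foldl_max Rst g0).1
    | i + 1 =>
      exact (PySem.List.le_foldl_max Rst g0).2 _
        (by rw [hRst]; exact List.mem_map.mpr ⟨i, List.mem_range.mpr (by omega), rfl⟩)
  -- every adjacent difference of the arrangement is bounded by B's fold
  have hterm : ∀ k, k < n - 1 → |o.getD (k + 1) 0 - o.getD k 0| ≤ Rst.foldl max g0 := by
    intro k hk
    by_cases hk0 : k = 0
    · subst hk0
      rw [hogL 1 (by omega) (by omega) (by omega), hog0,
          habs' (n - 1) (n - 2 * 1) (by omega) (by omega)]
      have h1 : s.getD (n - 1) 0 - s.getD (n - 2 * 1) 0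
          ≤ s.getD ((n - 3) + 2) 0 - s.getD (n - 3) 0 := by
        rw [(by omega : (n - 3) + 2 = n - 1)]
        exact sub_le_sub_left (hmono (n - 3) (n - 2 * 1) (by omega) (by omega)) _
      exact h1.trans (hgapR (n - 3) le_rfl)
    · by_cases hL : 2 * (k + 1) ≤ n
      · -- both written from the left: a genuine two-apart gap
        rw [hogL (k + 1) (by omega) hL (by omega), hogL k (by omega) (by omega) (by omega),
            habs' (n - 2 * k) (n - 2 * (k + 1)) (by omega) (by omega)]
        have h1 : n - 2 * k = (n - 2 * (k + 1)) + 2 := by omega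
        rw [h1]
        exact hgapR (n - 2 * (k + 1)) (by omega)
      · by_cases hM : 2 * k ≤ n
        · -- junction at the bottom of the circle: |s[1] - s[0]| ≤ s[2] - s[0]
          rw [hogL k (by omega) hM (by omega), hogR (k + 1) (by omega) (by omega)]
          have h2 : s.getD (2 * (k + 1) - n - 1) 0 - s.getD (n - 2 * k) 0 ≤ g0 ∧
              s.getD (n - 2 * k) 0 - s.getD (2 * (k + 1) - n - 1) 0 ≤ g0 := by
            rcases (by omega : n = 2 * k ∨ n = 2 * k + 1) with h | h
            · rw [(by omega : 2 * (k + 1) - n - 1 = 1), (by omega : n - 2 * k = 0), hg0]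
              constructor
              · exact sub_le_sub_right (hmono 1 2 (by omega) (by omega)) _
              · have := hmono 0 1 (by omega) (by omega)
                have h0 := hmono 0 2 (by omega) (by omega)
                omega
            · rw [(by omega : 2 * (k + 1) - n - 1 = 0), (by omega : n - 2 * k = 1), hg0]
              constructor
              · have := hmono 0 1 (by omega) (by omega)
                have h0 := hmono 0 2 (by omega) (by omega)
                omega
              · exact sub_le_sub_right (hmono 1 2 (by omega) (by omega)) _
          have h3' : |s.getD (2 * (k + 1) - n - 1) 0 - s.getD (n - 2 * k) 0| ≤ g0 := by
            rw [abs_sub_le_iff]; exact ⟨h2.1, h2.2⟩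
          exact h3'.trans (hgapR 0 (by omega))
        · -- both written from the right: a genuine two-apart gap
          rw [hogR (k + 1) (by omega) (by omega), hogR k (by omega) (by omega),
              habs (2 * (k + 1) - n - 1) (2 * k - n - 1) (by omega) (by omega)]
          have h1 : 2 * (k + 1) - n - 1 = (2 * k - n - 1) + 2 := by omega
          rw [h1]
          exact hgapR (2 * k - n - 1) (by omega)
  -- the wrap-around edge
  have hendval : e = s.getD ((n - 3) + 2) 0 - s.getD (n - 3) 0 := by
    rw [he, hog0, hogR (n - 1) (by omega) (by omega),
        habs (n - 1) (2 * (n - 1) - n - 1) (by omega) (by omega),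
        (by omega : 2 * (n - 1) - n - 1 = n - 3), (by omega : (n - 3) + 2 = n - 1)]
  have hLR : Lst.foldl max e ≤ Rst.foldl max g0 := by
    rcases PySem.List.foldl_max_mem Lst e with h | h
    · rw [h, hendval]; exact hgapR (n - 3) le_rfl
    · rw [hLst] at h
      obtain ⟨k, hkmem, hkeq⟩ := List.mem_map.mp h
      rw [← hkeq]; exact hterm k (List.mem_range.mp hkmem)
  -- converse: every gap appears as an edge of the arrangement
  have hdiffL : ∀ k, k < n - 1 → |o.getD (k + 1) 0 - o.getD k 0| ≤ Lst.foldl max e := by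
    intro k hk
    exact (PySem.List.le_foldl_max Lst e).2 _
      (by rw [hLst]; exact List.mem_map.mpr ⟨k, List.mem_range.mpr hk, rfl⟩)
  have hgapL : ∀ i, i ≤ n - 3 → s.getD (i + 2) 0 - s.getD i 0 ≤ Lst.foldl max e := by
    intro i hi
    by_cases hi3 : i = n - 3
    · subst hi3
      rw [← hendval]; exact (PySem.List.le_foldl_max Lst e).1
    · by_cases hpar : (n - i) % 2 = 0
      · -- same parity as n: edge between two left-written seats, k = (n-i-2)/2
        have hk2 : 2 * ((n - i - 2) / 2) = n - i - 2 := by omega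
        have h1 : |o.getD ((n - i - 2) / 2 + 1) 0 - o.getD ((n - i - 2) / 2) 0|
            = s.getD (i + 2) 0 - s.getD i 0 := by
          rw [hogL ((n - i - 2) / 2 + 1) (by omega) (by omega) (by omega),
              hogL ((n - i - 2) / 2) (by omega) (by omega) (by omega),
              (by omega : n - 2 * ((n - i - 2) / 2 + 1) = i),
              (by omega : n - 2 * ((n - i - 2) / 2) = i + 2)]
          exact habs' (i + 2) i (by omega) (by omega)
        rw [← h1]; exact hdiffL _ (by omega)
      · -- opposite parity: edge between two right-written seats, k = (i+n+1)/2
        have hk2 : 2 * ((i + n + 1) / 2) = i + n + 1 := by omega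
        have hi5 : i ≤ n - 5 := by omega
        have h1 : |o.getD ((i + n + 1) / 2 + 1) 0 - o.getD ((i + n + 1) / 2) 0|
            = s.getD (i + 2) 0 - s.getD i 0 := by
          rw [hogR ((i + n + 1) / 2 + 1) (by omega) (by omega),
              hogR ((i + n + 1) / 2) (by omega) (by omega),
              (by omega : 2 * ((i + n + 1) / 2 + 1) - n - 1 = i + 2),
              (by omega : 2 * ((i + n + 1) / 2) - n - 1 = i)]
          exact habs (i + 2) i (by omega) (by omega)
        rw [← h1]; exact hdiffL _ (by omega)
  have hRL : Rst.foldl max g0 ≤ Lst.foldl max e := by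
    rcases PySem.List.foldl_max_mem Rst g0 with h | h
    · rw [h, hg0]
      have := hgapL 0 (by omega)
      simpa using this
    · rw [hRst] at h
      obtain ⟨k, hkmem, hkeq⟩ := List.mem_map.mp h
      rw [← hkeq]; exact hgapL (k + 1) (by have := List.mem_range.mp hkmem; omega)
  exact le_antisymm hLR hRL

theorem pvPlaceLoop_cons_true (v : Int) (rest o : List Int) (l r : Nat) :
    pvPlaceLoop (v :: rest) o l r true = pvPlaceLoop rest (o.set l v) (l + 1) r false := rfl
theorem pvPlaceLoop_cons_false (v : Int) (rest o : List Int) (l r : Nat) :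
    pvPlaceLoop (v :: rest) o l r false = pvPlaceLoop rest (o.set r v) l (r - 1) true := rfl

theorem pvPlaceLoop_eq (rev : List Int) : ∀ (P S : List Int) (pl : Bool),
    pvPlaceLoop rev (P ++ List.replicate rev.length 0 ++ S) P.length (P.length + rev.length - 1) pl
      = P ++ pvMid rev pl ++ S := by
  induction rev with
  | nil => intro P S pl; cases pl <;> simp [pvPlaceLoop, pvMid]
  | cons v t ih =>
    intro P S pl
    have hlen : (v :: t).length = t.length + 1 := rfl
    cases pl
    · -- placeLeft = false : write at the right end of the middle
      rw [pvPlaceLoop_cons_false]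
      have hset : (P ++ List.replicate (v :: t).length 0 ++ S).set (P.length + (v :: t).length - 1) v
          = P ++ List.replicate t.length 0 ++ (v :: S) := by
        rw [List.append_assoc, List.set_append_right _ _ (by simp only [hlen]; omega)]
        have h1 : P.length + (v :: t).length - 1 - P.length = t.length := by
          simp only [hlen]; omega
        rw [h1, hlen, List.replicate_succ' (n := t.length), List.append_assoc,
            List.set_append_right _ _ (by simp only [List.length_replicate]; exact le_rfl)]
        simp
      rw [hset]
      have hr : P.length + (v :: t).length - 1 - 1 = P.length + t.length - 1 := by
        simp only [hlen]; omega
      rw [hr, ih P (v :: S) true]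
      simp [pvMid]
    · -- placeLeft = true : write at the left end of the middle
      rw [pvPlaceLoop_cons_true]
      have hset : (P ++ List.replicate (v :: t).length 0 ++ S).set P.length v
          = (P ++ [v]) ++ List.replicate t.length 0 ++ S := by
        rw [List.append_assoc, List.set_append_right _ _ le_rfl]
        simp [List.replicate_succ]
      rw [hset]
      have hl : P.length + 1 = (P ++ [v]).length := by simp
      have hr : P.length + (v :: t).length - 1 = (P ++ [v]).length + t.length - 1 := by
        simp only [hlen, List.length_append, List.length_cons, List.length_nil]; omega
      rw [hl, hr, ih (P ++ [v]) S false]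
      simp [pvMid]

-- ===== VERDICT (by name: the statement is the Claim_ definition above) =====
theorem minOverallAwkwardness_spec : Claim_equal_minOverallAwkwardness := by
  unfold Claim_equal_minOverallAwkwardness
  intro arr _ hpre
  unfold Spec_minOverallAwkwardness minOverallAwkwardness minOverallAwkwardness_alt
  have hs : PySem.List.sorted arr (fun x => x) false ≠ [] := by
    intro h
    exact hpre (List.Perm.eq_nil ((h ▸ PySem.List.sorted_perm arr (fun x => x) false).symm))
  set s := PySem.List.sorted arr (fun x => x) false with hsdef
  rw [dif_neg hs]
  have hmono : ∀ p q : Nat, p ≤ q → q < s.length → s.getD p 0 ≤ s.getD q 0 := by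
    intro p q hpq hq
    rw [List.getD_eq_getElem _ _ (by omega), List.getD_eq_getElem _ _ hq]
    exact PySem.List.sorted_id_getElem_mono arr hpq hq
  by_cases h3 : s.length < 3
  · -- n = 1 or n = 2 : both sides are |max - min| (0 for a singleton)
    rw [if_pos h3]
    match s, hs with
    | [a], _ =>
      simp only [pvPlaceLoop, List.dropLast_singleton, List.reverse_nil, List.length_singleton,
        List.replicate_one, List.set_cons_zero, List.getLast_singleton]
      rw [PySem.List.len_eq, show ((([a] : List Int).length : Int)) = 1 by simp,
          PySem.List.pyRange_one_eq_nil le_rfl]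
      simp
    | [a, b], _ =>
      simp only [List.dropLast_cons₂, List.dropLast_singleton, List.reverse_cons, List.reverse_nil,
        List.nil_append, List.length_cons, List.length_nil, List.getLast]
      rw [show pvPlaceLoop [a] ((List.replicate (0 + 1 + 1) 0).set 0 b) 1 (0 + 1 + 1 - 1) true
            = [b, a] by norm_num [pvPlaceLoop, List.replicate]]
      rw [PySem.List.len_eq, show ((([b, a] : List Int).length : Int)) = 1 + 1 by norm_num,
          PySem.List.pyRange_one_singleton]
      simp [pysem, abs_sub_comm]
    | a :: b :: c :: t, _ => simp at h3; omega
  · rw [if_neg h3]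
    have hn3 : 3 ≤ s.length := by omega
    -- A's loop produces the zigzag arrangement
    have hout : pvPlaceLoop s.dropLast.reverse ((List.replicate s.length 0).set 0 (s.getLast hs))
          1 (s.length - 1) true
        = s.getLast hs :: pvMid s.dropLast.reverse true := by
      have hrep : (List.replicate s.length 0).set 0 (s.getLast hs)
          = [s.getLast hs] ++ List.replicate s.dropLast.reverse.length 0 ++ ([] : List Int) := by
        rw [show s.length = s.dropLast.reverse.length + 1 by simp; omega, List.replicate_succ]
        simp
      rw [hrep, show s.length - 1 = 1 + s.dropLast.reverse.length - 1 by simp]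
      have h := pvPlaceLoop_eq s.dropLast.reverse [s.getLast hs] [] true
      simp only [List.length_singleton] at h
      rw [h]
      simp
    simp only [hout]
    set o := s.getLast hs :: pvMid s.dropLast.reverse true with hodef
    have hone : o ≠ [] := by rw [hodef]; simp
    have holen : o.length = s.length := by
      rw [hodef]; simp only [List.length_cons, pvMid_length]; simp; omega
    -- normalize A's fold
    rw [PySem.List.len_eq, holen, PySem.List.pyRange_one,
        show ((s.length : Int) - 1).toNat = s.length - 1 by omega,
        List.foldl_map]
    have hbodyA : (fun (x : Int) (y : Nat) =>
          max x |PySem.List.pyGetD o (1 + (y : Int)) 0 - PySem.List.pyGetD o (1 + (y : Int) - 1) 0|)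
        = fun (w : Int) (k : Nat) => max w |o.getD (k + 1) 0 - o.getD k 0| := by
      funext w k
      rw [show (1 : Int) + (k : Int) = ((k + 1 : Nat) : Int) by push_cast; ring,
          PySem.List.pyGetD_natCast,
          show ((k + 1 : Nat) : Int) - 1 = ((k : Nat) : Int) by push_cast; ring,
          PySem.List.pyGetD_natCast]
    rw [hbodyA]
    -- normalize A's initial value (the wrap-around edge)
    have hlast : o.getLast hone = o.getD (s.length - 1) 0 := by
      rw [← holen, List.getLast_eq_getElem, List.getD_eq_getElem o 0 (by omega)]
    rw [PySem.List.pyGetD_zero, PySem.List.pyGetD_neg_one o 0 hone, hlast]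
    -- normalize B's fold
    rw [PySem.List.pyRange_one,
        show ((s.length : Int) - 2 - 1).toNat = s.length - 3 by omega,
        List.foldl_map]
    have hbodyB : (fun (x : Int) (y : Nat) =>
          max x (PySem.List.pyGetD s (1 + (y : Int) + 2) 0 - PySem.List.pyGetD s (1 + (y : Int)) 0))
        = fun (w : Int) (k : Nat) => max w (s.getD (k + 1 + 2) 0 - s.getD (k + 1) 0) := by
      funext w k
      rw [show (1 : Int) + (k : Int) = ((k + 1 : Nat) : Int) by push_cast; ring,
          PySem.List.pyGetD_natCast,
          show ((k + 1 : Nat) : Int) + 2 = ((k + 1 + 2 : Nat) : Int) by push_cast; ring,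
          PySem.List.pyGetD_natCast]
    rw [hbodyB, PySem.List.pyGetD_zero,
        show (2 : Int) = ((2 : Nat) : Int) by norm_num, PySem.List.pyGetD_natCast,
        show (List.foldl (fun (w : Int) (k : Nat) => max w |o.getD (k + 1) 0 - o.getD k 0|)
            |o.getD 0 0 - o.getD (s.length - 1) 0| (List.range (s.length - 1)))
          = ((List.range (s.length - 1)).map (fun k => |o.getD (k + 1) 0 - o.getD k 0|)).foldl max
              |o.getD 0 0 - o.getD (s.length - 1) 0| from List.foldl_map.symm,
        show (List.foldl (fun (w : Int) (k : Nat) => max w (s.getD (k + 1 + 2) 0 - s.getD (k + 1) 0))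
            (s.getD 2 0 - s.getD 0 0) (List.range (s.length - 3)))
          = ((List.range (s.length - 3)).map (fun k => s.getD (k + 1 + 2) 0 - s.getD (k + 1) 0)).foldl max
              (s.getD 2 0 - s.getD 0 0) from List.foldl_map.symm]
    exact pvCore s hs hn3 hmono
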